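-- pv_equiv track=rewrite | github.com/tellang/sonote | src/download.py | _make_sub_chunks
-- ===== SOURCE A (Python) =====
-- SUB_CHUNK_MIN = 15        # 서브청크 크기 (분)
--
-- BOUNDARY_MARGIN_MIN = 5   # 마지막 청크 경계 여유 (분)
--
-- def _make_sub_chunks(
--     block_from: int,
--     block_to: int,
--     chunk_min: int = SUB_CHUNK_MIN,
-- ) -> list[tuple[int, int]]:
--     """
--     블록을 서브청크로 분할.
--
--     Args:
--         block_from: 시작 (minutes_back, 큰 수 = 더 과거)
--         block_to: 끝 (minutes_back, 작은 수 = 더 최근)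
--         chunk_min: 서브청크 크기(분)
--
--     Returns:
--         [(back_minutes, duration_minutes), ...] — 시간순 (과거→최근)
--     """
--     chunks = []
--     pos = block_from
--     while pos > block_to:
--         remaining = pos - block_to
--         dur = min(chunk_min, remaining)
--         # 마지막 청크에 경계 여유분 추가
--         if dur == remaining:
--             dur += BOUNDARY_MARGIN_MIN
--         chunks.append((pos, dur))
--         pos -= min(chunk_min, remaining)
--     return chunks
-- ===== SOURCE B (Python) =====
-- SUB_CHUNK_MIN = 15
-- BOUNDARY_MARGIN_MIN = 5
--
-- def _make_sub_chunks(
--     block_from: int,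
--     block_to: int,
--     chunk_min: int = SUB_CHUNK_MIN,
-- ) -> list[tuple[int, int]]:
--     total = block_from - block_to
--     if total <= 0:
--         return []
--     n_full = (total - 1) // chunk_min
--     chunks = [(block_from - i * chunk_min, chunk_min) for i in range(n_full)]
--     last_pos = block_from - n_full * chunk_min
--     chunks.append((last_pos, (last_pos - block_to) + BOUNDARY_MARGIN_MIN))
--     return chunks
-- ===== Notes on version B (the rewrite author's own statement) =====
-- stated objective: alternative
-- what changed: Replaced the decrement-and-test while loop by a closed-form chunk count: n_full = (total-1)//chunk_min full chunks built by a comprehension plus one separately constructed final chunk carrying the boundary margin.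
import Mathlib
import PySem

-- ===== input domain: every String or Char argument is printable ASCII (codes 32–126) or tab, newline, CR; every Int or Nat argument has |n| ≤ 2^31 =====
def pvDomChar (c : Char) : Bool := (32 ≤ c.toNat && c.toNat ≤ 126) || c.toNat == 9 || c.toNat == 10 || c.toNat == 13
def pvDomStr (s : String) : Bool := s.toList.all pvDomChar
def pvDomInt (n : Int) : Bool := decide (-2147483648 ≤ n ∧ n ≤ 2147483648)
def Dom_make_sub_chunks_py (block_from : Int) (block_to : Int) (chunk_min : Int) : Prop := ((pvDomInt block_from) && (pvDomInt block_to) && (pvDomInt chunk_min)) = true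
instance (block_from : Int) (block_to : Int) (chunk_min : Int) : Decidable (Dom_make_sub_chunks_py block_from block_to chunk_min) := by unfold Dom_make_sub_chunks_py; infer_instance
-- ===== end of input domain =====

-- B replaces A's decrement-and-test while loop by a closed-form chunk count plus a
-- separately built final chunk (alternative decomposition, same asymptotic cost).

-- ===== PORT A =====
-- A's while loop, with fuel (block_from - block_to).toNat: each iteration shrinks
-- pos - block_to by min chunk_min remaining ≥ 1 whenever chunk_min ≥ 1 (Pre_), so the
-- fuel is never exhausted on admitted inputs; on chunk_min ≤ 0 with pos > block_to the
-- Python loop diverges (excluded by Pre_).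
def aLoop (block_to chunk_min : Int) : Nat → Int → List (Int × Int) → List (Int × Int)
  | 0, _, acc => acc.reverse
  | fuel + 1, pos, acc =>
    if pos > block_to then
      let remaining := pos - block_to
      let dur0 := min chunk_min remaining
      let dur := if dur0 = remaining then dur0 + 5 else dur0
      aLoop block_to chunk_min fuel (pos - min chunk_min remaining) ((pos, dur) :: acc)
    else acc.reverse

def make_sub_chunks_py (block_from : Int) (block_to : Int) (chunk_min : Int) : List (Int × Int) :=
  aLoop block_to chunk_min (block_from - block_to).toNat block_from []

-- ===== PORT B =====
def make_sub_chunks_py_alt (block_from : Int) (block_to : Int) (chunk_min : Int) : List (Int × Int) :=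
  let total := block_from - block_to
  if total ≤ 0 then []
  else
    let n_full := PySem.Int.floordiv (total - 1) chunk_min
    let chunks := (List.range n_full.toNat).map (fun (i : Nat) => (block_from - (i : Int) * chunk_min, chunk_min))
    let last_pos := block_from - n_full * chunk_min
    chunks ++ [(last_pos, (last_pos - block_to) + 5)]

-- ===== PRECONDITION & SPEC =====
-- Pre_ excludes exactly the inputs on which the Python A never returns: with
-- chunk_min ≤ 0 and block_from > block_to the while loop does not make progress
-- (A diverges; B raises ZeroDivisionError or returns — both outside the claim).
def Pre_make_sub_chunks_py (block_from : Int) (block_to : Int) (chunk_min : Int) : Prop :=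
  block_from ≤ block_to ∨ 1 ≤ chunk_min
instance (block_from : Int) (block_to : Int) (chunk_min : Int) : Decidable (Pre_make_sub_chunks_py block_from block_to chunk_min) := by unfold Pre_make_sub_chunks_py; infer_instance

def pvWitness_make_sub_chunks_py : Int × Int × Int := (60, 0, 15)

def Spec_make_sub_chunks_py (block_from : Int) (block_to : Int) (chunk_min : Int) (out : List (Int × Int)) : Prop := out = make_sub_chunks_py_alt block_from block_to chunk_min
instance (block_from : Int) (block_to : Int) (chunk_min : Int) (out : List (Int × Int)) : Decidable (Spec_make_sub_chunks_py block_from block_to chunk_min out) := by unfold Spec_make_sub_chunks_py; infer_instance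

-- ===== CLAIM (what is proved, stated in full; the proofs are below) =====
def Claim_equal_make_sub_chunks_py : Prop := ∀ (block_from : Int) (block_to : Int) (chunk_min : Int), Dom_make_sub_chunks_py block_from block_to chunk_min → Pre_make_sub_chunks_py block_from block_to chunk_min → Spec_make_sub_chunks_py block_from block_to chunk_min (make_sub_chunks_py block_from block_to chunk_min)

-- ===== LEMMAS AND PROOFS =====

-- One unrolling of B's closed form: for pos > block_to, B at pos is B's first chunk
-- consed onto B at pos - min chunk_min (pos - block_to).
lemma alt_cons (block_to chunk_min pos : Int) (hcm : 1 ≤ chunk_min) (hpos : block_to < pos) :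
    make_sub_chunks_py_alt pos block_to chunk_min =
      (pos, if min chunk_min (pos - block_to) = pos - block_to
            then min chunk_min (pos - block_to) + 5 else min chunk_min (pos - block_to)) ::
      make_sub_chunks_py_alt (pos - min chunk_min (pos - block_to)) block_to chunk_min := by
  have hcm0 : (0 : Int) < chunk_min := by omega
  by_cases hbig : pos - block_to ≤ chunk_min
  · -- final chunk: min = remaining, n_full = 0
    have hmin : min chunk_min (pos - block_to) = pos - block_to := by omega
    have hn : PySem.Int.floordiv (pos - block_to - 1) chunk_min = 0 :=
      (PySem.Int.floordiv_eq_iff_of_pos hcm0).mpr (by constructor <;> omega)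
    rw [hmin]
    simp [make_sub_chunks_py_alt, hn, show ¬ pos - block_to ≤ 0 by omega]
  · -- non-final chunk: min = chunk_min, n_full ≥ 1
    have hmin : min chunk_min (pos - block_to) = chunk_min := by omega
    set n := PySem.Int.floordiv (pos - block_to - 1) chunk_min with hn
    have hchar : n * chunk_min ≤ pos - block_to - 1 ∧ pos - block_to - 1 < (n + 1) * chunk_min :=
      (PySem.Int.floordiv_eq_iff_of_pos hcm0).mp hn.symm
    have hn1 : 1 ≤ n := by nlinarith [hchar.1, hchar.2]
    have hn' : PySem.Int.floordiv (pos - chunk_min - block_to - 1) chunk_min = n - 1 :=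
      (PySem.Int.floordiv_eq_iff_of_pos hcm0).mpr (by constructor <;> nlinarith [hchar.1, hchar.2])
    have htoNat : n.toNat = (n - 1).toNat + 1 := by omega
    have hkey : ∀ (m : Nat) (base : Int),
        (List.range (m + 1)).map (fun (i : Nat) => (base - (i : Int) * chunk_min, chunk_min)) =
          (base, chunk_min) ::
            (List.range m).map (fun (i : Nat) => (base - chunk_min - (i : Int) * chunk_min, chunk_min)) := by
      intro m base
      rw [List.range_succ_eq_map, List.map_cons, List.map_map]
      simp only [Nat.cast_zero, zero_mul, sub_zero, List.cons.injEq, true_and]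
      apply List.map_congr_left
      intro i _
      simp only [Function.comp_apply, Prod.mk.injEq, and_true]
      push_cast
      ring
    rw [hmin]
    simp only [make_sub_chunks_py_alt,
      show ¬ pos - block_to ≤ 0 by omega, show ¬ pos - chunk_min - block_to ≤ 0 by omega,
      if_false, ← hn, hn', htoNat, if_neg (show ¬ chunk_min = pos - block_to by omega)]
    rw [hkey (n - 1).toNat pos, List.cons_append,
      show pos - chunk_min - (n - 1) * chunk_min = pos - n * chunk_min from by ring]

lemma loop_eq (block_to chunk_min : Int) (hcm : 1 ≤ chunk_min) :
    ∀ (fuel : Nat) (pos : Int) (acc : List (Int × Int)), (pos - block_to).toNat ≤ fuel →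
      aLoop block_to chunk_min fuel pos acc =
        acc.reverse ++ make_sub_chunks_py_alt pos block_to chunk_min := by
  intro fuel
  induction fuel with
  | zero =>
    intro pos acc h
    simp [aLoop, make_sub_chunks_py_alt, show pos - block_to ≤ 0 by omega]
  | succ n ih =>
    intro pos acc h
    by_cases hpos : pos > block_to
    · have hstep : (pos - min chunk_min (pos - block_to) - block_to).toNat ≤ n := by omega
      simp only [aLoop, if_pos hpos]
      rw [ih _ _ hstep, alt_cons block_to chunk_min pos hcm hpos]
      simp
    · rw [aLoop.eq_def]
      simp [hpos, make_sub_chunks_py_alt, show pos - block_to ≤ 0 by omega]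

-- ===== VERDICT (by name: the statement is the Claim_ definition above) =====
theorem make_sub_chunks_py_spec : Claim_equal_make_sub_chunks_py := by
  intro bf bt cm _ hpre
  unfold Spec_make_sub_chunks_py make_sub_chunks_py
  rcases hpre with h | hcm
  · have h0 : (bf - bt).toNat = 0 := by omega
    rw [h0]
    simp [aLoop, make_sub_chunks_py_alt, show bf - bt ≤ 0 by omega]
  · exact (loop_eq bt cm hcm _ bf [] le_rfl).trans (by simp)
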